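-- pv_equiv track=rewrite | github.com/happykhan/ronasub | nrp2cog/discord_plugin.py | create_error_list
-- ===== SOURCE A (Python) =====
-- def create_error_list(errors):
--     errorlist = ''
--     total_char = 0
--     for cogid, x in errors.items():
--         for field, message in x.items():
--             this_message = f"{cogid}\t{field}\t{message[0]}\n"
--             if len(errorlist) + len(this_message) < 1850:
--                 errorlist += this_message
--             total_char += len(this_message)
--     if total_char > 1850:
--         errorlist += '\nTOO MANY ERRORS. TRUNCATED.'
--     return errorlist
-- ===== SOURCE B (Python) =====
-- def create_error_list(errors):
--     # flatten the nested dict into formatted lines first, then fill greedily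
--     msgs = []
--     for cogid, x in errors.items():
--         for field, message in x.items():
--             msgs.append(f"{cogid}\t{field}\t{message[0]}\n")
--     total_char = sum(len(s) for s in msgs)
--     errorlist = ''
--     for s in msgs:
--         if len(errorlist) + len(s) < 1850:
--             errorlist += s
--     if total_char > 1850:
--         errorlist += '\nTOO MANY ERRORS. TRUNCATED.'
--     return errorlist
-- ===== Notes on version B (the rewrite author's own statement) =====
-- stated objective: alternative
-- what changed: A's single interleaved nested pass (building the truncated string and counting total characters in one loop) is split into a flatten pass producing the formatted lines, a separate sum of their lengths, and a separate greedy fill loop over the flat list.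
import Mathlib
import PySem

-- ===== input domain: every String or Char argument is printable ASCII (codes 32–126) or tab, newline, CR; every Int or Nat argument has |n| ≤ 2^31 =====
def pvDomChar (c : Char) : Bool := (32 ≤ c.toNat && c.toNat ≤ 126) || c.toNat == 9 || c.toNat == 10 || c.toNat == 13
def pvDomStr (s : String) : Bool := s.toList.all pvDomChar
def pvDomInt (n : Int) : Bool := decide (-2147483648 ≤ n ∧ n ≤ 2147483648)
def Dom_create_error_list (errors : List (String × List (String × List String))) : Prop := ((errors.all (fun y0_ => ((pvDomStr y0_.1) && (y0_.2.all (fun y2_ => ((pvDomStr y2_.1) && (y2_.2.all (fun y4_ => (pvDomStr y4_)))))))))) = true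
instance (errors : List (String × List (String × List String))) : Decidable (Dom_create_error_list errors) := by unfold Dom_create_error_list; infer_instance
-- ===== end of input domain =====

-- B splits A's single interleaved pass into: flatten to formatted lines, sum the lengths, then a separate greedy fill (objective: alternative decomposition).
-- Strings are handled on the List Char side (PySem convention); message[0] is PySem.List.pyGet? (Pre_ excludes the IndexError inputs).

-- ===== PORT A =====
-- f"{cogid}\t{field}\t{message[0]}\n" (message[0] total via getD; Pre_ excludes message = [])
def pvLine (cogid : String) (q : String × List String) : List Char :=
  cogid.toList ++ '\t' :: q.1.toList ++ '\t' :: ((PySem.List.pyGet? q.2 0).getD "").toList ++ ['\n']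

def pvTrunc : List Char := "\nTOO MANY ERRORS. TRUNCATED.".toList

def create_error_list (errors : List (String × List (String × List String))) : String :=
  let st := errors.foldl (fun st p =>
    p.2.foldl (fun st q =>
      let this_message := pvLine p.1 q
      (if st.1.length + this_message.length < 1850 then st.1 ++ this_message else st.1,
       st.2 + this_message.length)) st) (([] : List Char), (0 : Nat))
  String.ofList (if st.2 > 1850 then st.1 ++ pvTrunc else st.1)

-- ===== PORT B =====
def create_error_list_alt (errors : List (String × List (String × List String))) : String :=
  let msgs := errors.foldl (fun acc p =>
    p.2.foldl (fun acc q => acc ++ [pvLine p.1 q]) acc) ([] : List (List Char))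
  let total_char := (msgs.map List.length).sum
  let errorlist := msgs.foldl (fun el s =>
    if el.length + s.length < 1850 then el ++ s else el) ([] : List Char)
  String.ofList (if total_char > 1850 then errorlist ++ pvTrunc else errorlist)

-- ===== PRECONDITION & SPEC =====
-- Pre_ excludes exactly the inputs on which Python A raises IndexError at message[0] (a field whose message list holds no element).
def Pre_create_error_list (errors : List (String × List (String × List String))) : Prop :=
  ∀ p ∈ errors, ∀ q ∈ p.2, q.2 ≠ []
instance (errors : List (String × List (String × List String))) : Decidable (Pre_create_error_list errors) := by unfold Pre_create_error_list; infer_instance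
def pvWitness_create_error_list : (List (String × List (String × List String))) :=
  [("cog1", [("field", ["bad value"])])]

def Spec_create_error_list (errors : List (String × List (String × List String))) (out : String) : Prop := out = create_error_list_alt errors
instance (errors : List (String × List (String × List String))) (out : String) : Decidable (Spec_create_error_list errors out) := by unfold Spec_create_error_list; infer_instance

-- ===== CLAIM (what is proved, stated in full; the proofs are below) =====
def Claim_equal_create_error_list : Prop := ∀ (errors : List (String × List (String × List String))), Dom_create_error_list errors → Pre_create_error_list errors → Spec_create_error_list errors (create_error_list errors)

-- ===== LEMMAS AND PROOFS =====

-- A's inner loop over one cog's fields = greedy fill over that cog's lines, plus their total length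
theorem pvInner (c : String) (xs : List (String × List String)) (el : List Char) (t : Nat) :
    xs.foldl (fun st q =>
      (if st.1.length + (pvLine c q).length < 1850 then st.1 ++ pvLine c q else st.1,
       st.2 + (pvLine c q).length)) (el, t)
    = ((xs.map (pvLine c)).foldl (fun el s => if el.length + s.length < 1850 then el ++ s else el) el,
       t + ((xs.map (pvLine c)).map List.length).sum) := by
  induction xs generalizing el t with
  | nil => simp
  | cons q xs ih => simp [ih]; omega

-- A's nested loop = greedy fill over the flattened lines, plus the total length
theorem pvOuter (errors : List (String × List (String × List String))) (el : List Char) (t : Nat) :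
    errors.foldl (fun st p =>
      p.2.foldl (fun st q =>
        (if st.1.length + (pvLine p.1 q).length < 1850 then st.1 ++ pvLine p.1 q else st.1,
         st.2 + (pvLine p.1 q).length)) st) (el, t)
    = ((errors.flatMap (fun p => p.2.map (pvLine p.1))).foldl (fun el s => if el.length + s.length < 1850 then el ++ s else el) el,
       t + ((errors.flatMap (fun p => p.2.map (pvLine p.1))).map List.length).sum) := by
  induction errors generalizing el t with
  | nil => simp
  | cons p ps ih => simp [pvInner, ih, List.foldl_append]; omega

-- B's flatten loop builds exactly the flattened list of lines
theorem pvFlat (errors : List (String × List (String × List String))) :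
    errors.foldl (fun acc p =>
      p.2.foldl (fun acc q => acc ++ [pvLine p.1 q]) acc) ([] : List (List Char))
    = errors.flatMap (fun p => p.2.map (pvLine p.1)) := by
  suffices h : ∀ acc : List (List Char), errors.foldl (fun acc p =>
      p.2.foldl (fun acc q => acc ++ [pvLine p.1 q]) acc) acc
      = acc ++ errors.flatMap (fun p => p.2.map (pvLine p.1)) by simpa using h []
  induction errors with
  | nil => simp
  | cons p ps ih =>
    intro acc
    rw [List.foldl_cons, PySem.List.foldl_append_singleton_eq_map, ih, List.flatMap_cons,
      List.append_assoc]

-- ===== VERDICT (by name: the statement is the Claim_ definition above) =====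
theorem create_error_list_spec : Claim_equal_create_error_list := by
  intro errors _ _
  unfold Spec_create_error_list create_error_list create_error_list_alt
  rw [pvFlat, pvOuter]
  simp
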